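-- pv_equiv track=rewrite | github.com/wesheets/personal-ai-agent | tools/identify_remaining_endpoints.py | is_path_match
-- ===== SOURCE A (Python) =====
-- def is_path_match(actual_path, schema_path):
--     """Check if an actual path matches a schema path with parameters"""
--     # Replace test_id placeholders with {param} format for comparison
--     if "test_" in actual_path:
--         parts = actual_path.split("/")
--         for i, part in enumerate(parts):
--             if part.startswith("test_"):
--                 parts[i] = "{" + part[5:] + "}"
--         actual_path_normalized = "/".join(parts)
--     else:
--         actual_path_normalized = actual_path
--
--     # Direct comparison with schema path
--     if actual_path_normalized == schema_path:
--         return True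
--
--     # Check if paths match when ignoring path parameters
--     actual_parts = actual_path.strip("/").split("/")
--     schema_parts = schema_path.strip("/").split("/")
--
--     if len(actual_parts) != len(schema_parts):
--         return False
--
--     for i, (actual, schema) in enumerate(zip(actual_parts, schema_parts)):
--         if "{" in schema and "}" in schema:
--             # This is a path parameter, so it can match anything
--             continue
--         elif actual != schema:
--             return False
--
--     return True
-- ===== SOURCE B (Python) =====
-- def is_path_match(actual_path, schema_path):
--     """Check if an actual path matches a schema path with parameters"""
--     # The test_-normalization + direct-comparison pre-pass of the original is
--     # redundant: whenever it answers True, the segment comparison does too.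
--     actual_parts = actual_path.strip("/").split("/")
--     schema_parts = schema_path.strip("/").split("/")
--     return len(actual_parts) == len(schema_parts) and all(
--         ("{" in schema and "}" in schema) or actual == schema
--         for actual, schema in zip(actual_parts, schema_parts)
--     )
-- ===== Notes on version B (the rewrite author's own statement) =====
-- stated objective: simpler
-- what changed: B drops A's test_-normalization and direct string-comparison pre-pass entirely (proved redundant: whenever it returns True the segment loop would too) and replaces the explicit indexed loop with a single length check plus an all() over the zipped stripped segments.
import Mathlib
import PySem

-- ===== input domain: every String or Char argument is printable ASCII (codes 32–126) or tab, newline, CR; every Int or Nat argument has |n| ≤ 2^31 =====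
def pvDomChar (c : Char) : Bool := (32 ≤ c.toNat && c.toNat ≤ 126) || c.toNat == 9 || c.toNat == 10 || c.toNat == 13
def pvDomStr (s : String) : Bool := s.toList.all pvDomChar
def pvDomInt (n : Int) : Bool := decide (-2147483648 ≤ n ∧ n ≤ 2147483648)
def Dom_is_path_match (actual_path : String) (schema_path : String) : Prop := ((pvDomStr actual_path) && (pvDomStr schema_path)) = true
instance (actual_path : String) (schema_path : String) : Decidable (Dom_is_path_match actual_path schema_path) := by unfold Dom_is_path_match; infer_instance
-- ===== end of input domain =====

-- B drops A's redundant test_-normalization/direct-comparison pre-pass and is a single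
-- length check plus an all() over the zipped stripped path segments (simpler, same cost).


-- ===== PORT A =====
-- parts[i] = "{" + part[5:] + "}" when part.startswith("test_")
def pvNormSeg (p : List Char) : List Char :=
  if PySem.Chars.startswith p "test_".toList then
    '{' :: (PySem.Chars.slice p (some 5) none ++ ['}'])
  else p

-- the 'for i, (actual, schema) in enumerate(zip(...))' loop (i is unused)
def pvLoopA : List (List Char × List Char) → Bool
  | [] => true
  | (actual, schema) :: rest =>
    if PySem.Chars.isIn ['{'] schema && PySem.Chars.isIn ['}'] schema then pvLoopA rest
    else if actual ≠ schema then false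
    else pvLoopA rest

def is_path_match (actual_path : String) (schema_path : String) : Bool :=
  let aL := actual_path.toList
  let sL := schema_path.toList
  let actual_path_normalized :=
    if PySem.Chars.isIn "test_".toList aL then
      PySem.Chars.join ['/'] ((PySem.Chars.splitOn aL ['/']).map pvNormSeg)
    else aL
  if actual_path_normalized = sL then true
  else
    let actual_parts := PySem.Chars.splitOn (PySem.Chars.stripChars aL ['/']) ['/']
    let schema_parts := PySem.Chars.splitOn (PySem.Chars.stripChars sL ['/']) ['/']
    if actual_parts.length ≠ schema_parts.length then false
    else pvLoopA (actual_parts.zip schema_parts)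

-- ===== PORT B =====
def pvSegOk (pr : List Char × List Char) : Bool :=
  (PySem.Chars.isIn ['{'] pr.2 && PySem.Chars.isIn ['}'] pr.2) || pr.1 == pr.2

def is_path_match_alt (actual_path : String) (schema_path : String) : Bool :=
  let actual_parts := PySem.Chars.splitOn (PySem.Chars.stripChars actual_path.toList ['/']) ['/']
  let schema_parts := PySem.Chars.splitOn (PySem.Chars.stripChars schema_path.toList ['/']) ['/']
  actual_parts.length == schema_parts.length && (actual_parts.zip schema_parts).all pvSegOk

-- ===== PRECONDITION & SPEC =====
def Spec_is_path_match (actual_path : String) (schema_path : String) (out : Bool) : Prop := out = is_path_match_alt actual_path schema_path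
instance (actual_path : String) (schema_path : String) (out : Bool) : Decidable (Spec_is_path_match actual_path schema_path out) := by unfold Spec_is_path_match; infer_instance

-- ===== CLAIM (what is proved, stated in full; the proofs are below) =====
def Claim_equal_is_path_match : Prop := ∀ (actual_path : String) (schema_path : String), Dom_is_path_match actual_path schema_path → Spec_is_path_match actual_path schema_path (is_path_match actual_path schema_path)

-- ===== LEMMAS AND PROOFS =====

-- structural model of Python's single-char split("/")
def pvSplit : List Char → List (List Char)
  | [] => [[]]
  | c :: rest => if c = '/' then [] :: pvSplit rest else (pvSplit rest).modifyHead (c :: ·)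

-- structural model of "/".join
def pvJoin : List (List Char) → List Char
  | [] => []
  | [p] => p
  | p :: q :: r => p ++ '/' :: pvJoin (q :: r)

-- drop empty segments at both ends (mirrors strip("/") on the segment level)
def pvTrim (S : List (List Char)) : List (List Char) :=
  ((S.dropWhile (·.isEmpty)).reverse.dropWhile (·.isEmpty)).reverse

theorem pvSplit_ne_nil (l : List Char) : pvSplit l ≠ [] := by
  cases l with
  | nil => simp [pvSplit]
  | cons c rest =>
    simp only [pvSplit]
    split
    · simp
    · cases h : pvSplit rest with
      | nil => exact absurd h (pvSplit_ne_nil rest)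
      | cons a b => simp [List.modifyHead]

theorem pvJoin_eq_join (ps : List (List Char)) : PySem.Chars.join ['/'] ps = pvJoin ps := by
  induction ps with
  | nil => simp [PySem.Chars.join, List.intercalate, pvJoin]
  | cons p t ih =>
    cases t with
    | nil => simp [PySem.Chars.join, List.intercalate, pvJoin]
    | cons q r =>
      simp only [PySem.Chars.join, List.intercalate, List.intersperse] at ih ⊢
      simp [pvJoin, ← ih]

theorem pvSplit_go (fuel : Nat) (l cur : List Char) (acc : List (List Char))
    (hfuel : l.length < fuel) :
    PySem.Chars.splitOn.go ['/'] fuel l cur acc =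
      acc.reverse ++ (match pvSplit l with
        | [] => []
        | h :: t => (cur.reverse ++ h) :: t) := by
  induction fuel generalizing l cur acc with
  | zero => omega
  | succ fuel ih =>
    cases l with
    | nil => simp [PySem.Chars.splitOn.go, pvSplit]
    | cons c rest =>
      by_cases hc : c = '/'
      · subst hc
        rw [PySem.Chars.splitOn.go]
        simp only [List.isPrefixOf, BEq.rfl, Bool.true_and, if_true,
          List.length_cons, List.drop_succ_cons, List.length_nil, List.drop_zero]
        rw [ih rest [] (cur.reverse :: acc) (by simp at hfuel ⊢; omega)]
        cases h : pvSplit rest with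
        | nil => exact absurd h (pvSplit_ne_nil rest)
        | cons a b => simp [pvSplit, h]
      · rw [PySem.Chars.splitOn.go]
        have hpre : List.isPrefixOf ['/'] (c :: rest) = false := by
          simp [List.isPrefixOf, beq_eq_false_iff_ne, Ne.symm hc]
        simp only [hpre, Bool.false_eq_true, if_false]
        rw [ih rest (c :: cur) acc (by simp at hfuel ⊢; omega)]
        cases h : pvSplit rest with
        | nil => exact absurd h (pvSplit_ne_nil rest)
        | cons a b => simp [pvSplit, h, hc, List.modifyHead]

theorem splitOn_eq_pvSplit (l : List Char) : PySem.Chars.splitOn l ['/'] = pvSplit l := by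
  rw [PySem.Chars.splitOn, pvSplit_go (l.length + 1) l [] [] (by omega)]
  cases h : pvSplit l with
  | nil => exact absurd h (pvSplit_ne_nil l)
  | cons a b => simp

-- segments of a split contain no '/'
theorem pvSplit_slash_free (l : List Char) : ∀ p ∈ pvSplit l, '/' ∉ p := by
  induction l with
  | nil => simp [pvSplit]
  | cons c rest ih =>
    by_cases hc : c = '/'
    · subst hc
      intro p hp
      simp only [pvSplit] at hp
      cases hp with
      | head => simp
      | tail _ h' => exact ih p h'
    · obtain ⟨a, b, h⟩ := List.exists_cons_of_ne_nil (pvSplit_ne_nil rest)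
      intro p hp
      simp only [pvSplit, if_neg hc, h, List.modifyHead, List.mem_cons] at hp
      rcases hp with rfl | h'
      · have ha := ih a (by simp [h])
        simp only [List.mem_cons, not_or]
        exact ⟨Ne.symm hc, ha⟩
      · exact ih p (by simp [h, h'])

theorem pvJoin_pvSplit (l : List Char) : pvJoin (pvSplit l) = l := by
  induction l with
  | nil => simp [pvSplit, pvJoin]
  | cons c rest ih =>
    simp only [pvSplit]
    split
    · rename_i hc
      cases h : pvSplit rest with
      | nil => exact absurd h (pvSplit_ne_nil rest)
      | cons a b => rw [h] at ih; simp [pvJoin, hc, ih]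
    · cases h : pvSplit rest with
      | nil => exact absurd h (pvSplit_ne_nil rest)
      | cons a b =>
        rw [h] at ih
        cases b with
        | nil => simp [pvJoin, List.modifyHead] at ih ⊢; simp [ih]
        | cons b1 b2 => simp [pvJoin, List.modifyHead] at ih ⊢; simp [ih]

theorem pvSplit_slash_free_eq (p : List Char) (hp : '/' ∉ p) : pvSplit p = [p] := by
  induction p with
  | nil => simp [pvSplit]
  | cons c rest ih =>
    have hc : c ≠ '/' := fun h => hp (by simp [h])
    have := ih (fun h => hp (by simp [h]))
    simp [pvSplit, hc, this, List.modifyHead]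

theorem pvSplit_append (p l : List Char) (hp : '/' ∉ p) :
    pvSplit (p ++ l) = match pvSplit l with
      | [] => []
      | h :: t => (p ++ h) :: t := by
  induction p with
  | nil =>
    cases h : pvSplit l with
    | nil => exact absurd h (pvSplit_ne_nil l)
    | cons a b => simp [h]
  | cons c rest ih =>
    have hc : c ≠ '/' := fun h => hp (by simp [h])
    have := ih (fun h => hp (by simp [h]))
    cases h : pvSplit l with
    | nil => exact absurd h (pvSplit_ne_nil l)
    | cons a b =>
      simp only [h] at this
      simp [pvSplit, hc, this, List.modifyHead]

theorem pvSplit_pvJoin (ps : List (List Char)) (hne : ps ≠ [])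
    (hfree : ∀ p ∈ ps, '/' ∉ p) : pvSplit (pvJoin ps) = ps := by
  induction ps with
  | nil => exact absurd rfl hne
  | cons p t ih =>
    cases t with
    | nil => simp [pvJoin, pvSplit_slash_free_eq p (hfree p (by simp))]
    | cons q r =>
      have hp : '/' ∉ p := hfree p (by simp)
      have ihr := ih (by simp) (fun x hx => hfree x (by simp [hx]))
      simp only [pvJoin]
      rw [pvSplit_append p _ hp]
      have : pvSplit ('/' :: pvJoin (q :: r)) = [] :: pvSplit (pvJoin (q :: r)) := by
        simp [pvSplit]
      rw [this, ihr]
      simp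

theorem pvJoin_reverse (ps : List (List Char)) :
    (pvJoin ps).reverse = pvJoin ((ps.map List.reverse).reverse) := by
  induction ps with
  | nil => simp [pvJoin]
  | cons p t ih =>
    cases t with
    | nil => simp [pvJoin]
    | cons q r =>
      simp only [pvJoin, List.reverse_append, List.reverse_cons, List.map_cons]
      rw [ih]
      have : ∀ (xs : List (List Char)) (y : List Char), xs ≠ [] →
          pvJoin (xs ++ [y]) = pvJoin xs ++ '/' :: y := by
        intro xs y hxs
        induction xs with
        | nil => exact absurd rfl hxs
        | cons a b ihb =>
          cases b with
          | nil => simp [pvJoin]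
          | cons b1 b2 =>
            have h2 := ihb (by simp)
            simp only [List.cons_append] at h2 ⊢
            simp only [pvJoin, h2, List.append_assoc, List.cons_append]
      rw [this _ _ (by simp)]
      simp

-- step (i): dropping leading '/'-chars = dropping leading empty segments
theorem pvDrop_slash (l : List Char) :
    l.dropWhile (fun c => c == '/') = pvJoin ((pvSplit l).dropWhile (·.isEmpty)) := by
  induction l with
  | nil => simp [pvSplit, pvJoin]
  | cons c rest ih =>
    by_cases hc : c = '/'
    · subst hc
      rw [show pvSplit ('/' :: rest) = [] :: pvSplit rest by simp [pvSplit]]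
      simp only [List.dropWhile_cons]
      simpa using ih
    · obtain ⟨a, b, h⟩ := List.exists_cons_of_ne_nil (pvSplit_ne_nil rest)
      rw [show pvSplit (c :: rest) = (c :: a) :: b by
        simp [pvSplit, hc, h, List.modifyHead]]
      rw [List.dropWhile_cons, List.dropWhile_cons]
      have h1 : (c == '/') = false := by simp [hc]
      have h2 : ((c :: a).isEmpty) = false := rfl
      rw [h1, h2]
      simp only [Bool.false_eq_true, if_false]
      have h3 : pvJoin ((c :: a) :: b) = c :: pvJoin (a :: b) := by
        cases b <;> simp [pvJoin]
      rw [h3, ← h, pvJoin_pvSplit]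

theorem pvTrim_sub (S : List (List Char)) : ∀ p ∈ pvTrim S, p ∈ S := by
  intro p hp
  simp only [pvTrim, List.mem_reverse] at hp
  have h1 := List.dropWhile_sublist (l := (S.dropWhile (·.isEmpty)).reverse) (p := (·.isEmpty))
  have h2 := h1.mem hp
  simp only [List.mem_reverse] at h2
  exact (List.dropWhile_sublist (l := S) (p := (·.isEmpty))).mem h2

-- reverse commutes with dropping leading empty segments
theorem pvDropE_map_rev (L : List (List Char)) :
    (L.map List.reverse).dropWhile (·.isEmpty) = (L.dropWhile (·.isEmpty)).map List.reverse := by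
  induction L with
  | nil => simp
  | cons x t ih =>
    simp only [List.map_cons, List.dropWhile_cons, List.isEmpty_reverse]
    by_cases h : x.isEmpty <;> simp [h, ih]

-- strip("/") on the string = pvTrim on the segments
theorem stripChars_eq_pvTrim (l : List Char) :
    PySem.Chars.stripChars l ['/'] = pvJoin (pvTrim (pvSplit l)) := by
  have hpc : (fun c => List.contains ['/'] c) = (fun c : Char => c == '/') := by
    funext c
    simp only [List.contains_eq_mem, List.mem_cons, List.not_mem_nil, or_false]
    rw [Bool.beq_eq_decide_eq]
  rw [PySem.Chars.stripChars]
  simp only [hpc]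
  rw [pvDrop_slash l]
  by_cases hS1 : (pvSplit l).dropWhile (·.isEmpty) = []
  · rw [hS1]
    have hT : pvTrim (pvSplit l) = [] := by simp [pvTrim, hS1]
    rw [hT]
    simp [pvJoin]
  · rw [pvJoin_reverse]
    have hfree : ∀ p ∈ (((pvSplit l).dropWhile (·.isEmpty)).map List.reverse).reverse,
        '/' ∉ p := by
      intro p hp
      simp only [List.mem_reverse, List.mem_map] at hp
      obtain ⟨q, hq, rfl⟩ := hp
      have hq' : q ∈ pvSplit l := (List.dropWhile_sublist _).mem hq
      simpa using pvSplit_slash_free l q hq'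
    rw [pvDrop_slash, pvSplit_pvJoin _ (by simp [hS1]) hfree]
    rw [pvJoin_reverse]
    simp only [← List.map_reverse]
    rw [pvDropE_map_rev]
    simp only [← List.map_reverse, List.map_map]
    simp [pvTrim]

-- split(strip("/")) in terms of pvTrim
theorem pvSplit_strip (l : List Char) :
    pvSplit (PySem.Chars.stripChars l ['/']) =
      if pvTrim (pvSplit l) = [] then [[]] else pvTrim (pvSplit l) := by
  rw [stripChars_eq_pvTrim]
  by_cases h : pvTrim (pvSplit l) = []
  · simp [h, pvJoin, pvSplit]
  · rw [if_neg h, pvSplit_pvJoin _ h]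
    intro p hp
    exact pvSplit_slash_free l p (pvTrim_sub _ p hp)

theorem pvLoopA_eq_all (ps : List (List Char × List Char)) : pvLoopA ps = ps.all pvSegOk := by
  induction ps with
  | nil => simp [pvLoopA]
  | cons pr rest ih =>
    obtain ⟨a, s⟩ := pr
    simp only [pvLoopA, List.all_cons, pvSegOk]
    by_cases h : (PySem.Chars.isIn ['{'] s && PySem.Chars.isIn ['}'] s) = true
    · simp [h, ih]
    · by_cases he : a = s
      · subst he
        simp [h, ih]
      · simp [h, he]

-- pvNormSeg preserves emptiness and slash-freeness; changed segments contain both braces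
theorem pvNormSeg_isEmpty (p : List Char) : (pvNormSeg p).isEmpty = p.isEmpty := by
  cases p with
  | nil => simp [pvNormSeg, PySem.Chars.startswith]
  | cons c r =>
    simp only [pvNormSeg]
    split <;> simp

theorem pvSegOk_self (p : List Char) : pvSegOk (p, p) = true := by
  simp [pvSegOk]

theorem pvSegOk_norm (p : List Char) : pvSegOk (p, pvNormSeg p) = true := by
  by_cases h : PySem.Chars.startswith p "test_".toList = true
  · have h1 : '{' ∈ pvNormSeg p := by unfold pvNormSeg; rw [if_pos h]; simp
    have h2 : '}' ∈ pvNormSeg p := by unfold pvNormSeg; rw [if_pos h]; simp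
    have i1 : PySem.Chars.isIn ['{'] (pvNormSeg p) = true := by
      rw [PySem.Chars.isIn_iff_infix]
      obtain ⟨l1, l2, hl⟩ := List.append_of_mem h1
      exact ⟨l1, l2, by simp [hl]⟩
    have i2 : PySem.Chars.isIn ['}'] (pvNormSeg p) = true := by
      rw [PySem.Chars.isIn_iff_infix]
      obtain ⟨l1, l2, hl⟩ := List.append_of_mem h2
      exact ⟨l1, l2, by simp [hl]⟩
    simp [pvSegOk, i1, i2]
  · simp only [pvNormSeg, if_neg h]
    exact pvSegOk_self p

theorem pvNormSeg_slash_free (p : List Char) (hp : '/' ∉ p) : '/' ∉ pvNormSeg p := by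
  simp only [pvNormSeg]
  split
  · intro hmem
    simp only [List.mem_cons, List.mem_append] at hmem
    rcases hmem with h | h | h
    · exact absurd h.symm (by decide)
    · rw [PySem.Chars.slice_eq_listSlice] at h
      exact hp (PySem.List.mem_of_mem_slice p (some 5) none h)
    · exact absurd h (by decide)
  · exact hp

theorem pvTrim_map_norm (S : List (List Char)) :
    pvTrim (S.map pvNormSeg) = (pvTrim S).map pvNormSeg := by
  have hcomm : ∀ (L : List (List Char)),
      (L.map pvNormSeg).dropWhile (·.isEmpty) = (L.dropWhile (·.isEmpty)).map pvNormSeg := by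
    intro L
    induction L with
    | nil => simp
    | cons x t ih =>
      simp only [List.map_cons, List.dropWhile_cons, pvNormSeg_isEmpty]
      by_cases h : x.isEmpty = true
      · simp [h, ih]
      · simp [h]
  simp only [pvTrim]
  rw [hcomm, ← List.map_reverse, hcomm]
  simp [List.map_reverse]

-- B returns true whenever the two stripped segment lists are pointwise (p, pvNormSeg p)
theorem alt_true_of_norm (a s : String)
    (h : s.toList = pvJoin ((pvSplit a.toList).map pvNormSeg)) :
    is_path_match_alt a s = true := by
  have hfree : ∀ p ∈ (pvSplit a.toList).map pvNormSeg, '/' ∉ p := by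
    intro p hp
    obtain ⟨q, hq, rfl⟩ := List.mem_map.1 hp
    exact pvNormSeg_slash_free q (pvSplit_slash_free _ q hq)
  have hsp : pvSplit s.toList = (pvSplit a.toList).map pvNormSeg := by
    rw [h]
    exact pvSplit_pvJoin _ (by simp [pvSplit_ne_nil]) hfree
  simp only [is_path_match_alt, splitOn_eq_pvSplit, pvSplit_strip, hsp, pvTrim_map_norm]
  by_cases hE : pvTrim (pvSplit a.toList) = []
  · simp [hE, pvSegOk_self]
  · have : (pvTrim (pvSplit a.toList)).map pvNormSeg ≠ [] := by simpa using hE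
    rw [if_neg hE, if_neg this]
    set T := pvTrim (pvSplit a.toList)
    have hlen : T.length = (T.map pvNormSeg).length := by simp
    simp only [← hlen, beq_self_eq_true, Bool.true_and]
    rw [List.all_eq_true]
    intro pr hpr
    have : ∀ (L : List (List Char)), pr ∈ L.zip (L.map pvNormSeg) → pvSegOk pr = true := by
      intro L
      induction L with
      | nil => simp
      | cons x t ih =>
        intro hm
        simp only [List.map_cons, List.zip_cons_cons, List.mem_cons] at hm
        rcases hm with hm | hm
        · subst hm; exact pvSegOk_norm x
        · exact ih hm
    exact this T hpr

theorem main_eq (a s : String) : is_path_match a s = is_path_match_alt a s := by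
  simp only [is_path_match]
  by_cases htest : PySem.Chars.isIn "test_".toList a.toList = true
  · simp only [htest, if_true]
    by_cases heq : PySem.Chars.join ['/'] ((PySem.Chars.splitOn a.toList ['/']).map pvNormSeg) = s.toList
    · rw [if_pos heq]
      refine (alt_true_of_norm a s ?_).symm
      rw [← heq, pvJoin_eq_join, splitOn_eq_pvSplit]
    · rw [if_neg heq]
      simp only [is_path_match_alt, pvLoopA_eq_all]
      by_cases hlen : (PySem.Chars.splitOn (PySem.Chars.stripChars a.toList ['/']) ['/']).length =
          (PySem.Chars.splitOn (PySem.Chars.stripChars s.toList ['/']) ['/']).length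
      · simp [hlen]
      · simp [hlen]
  · simp only [Bool.not_eq_true] at htest
    simp only [htest, Bool.false_eq_true, if_false]
    by_cases heq : a.toList = s.toList
    · rw [if_pos heq]
      refine (?_ : is_path_match_alt a s = true).symm
      simp only [is_path_match_alt, heq, beq_self_eq_true, Bool.true_and]
      rw [List.all_eq_true]
      intro pr hpr
      have hz : ∀ (L : List (List Char)), pr ∈ L.zip L → pvSegOk pr = true := by
        intro L
        induction L with
        | nil => simp
        | cons x t ih =>
          intro hm
          simp only [List.zip_cons_cons, List.mem_cons] at hm
          rcases hm with rfl | hm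
          · exact pvSegOk_self x
          · exact ih hm
      exact hz _ hpr
    · rw [if_neg heq]
      simp only [is_path_match_alt, pvLoopA_eq_all]
      by_cases hlen : (PySem.Chars.splitOn (PySem.Chars.stripChars a.toList ['/']) ['/']).length =
          (PySem.Chars.splitOn (PySem.Chars.stripChars s.toList ['/']) ['/']).length
      · simp [hlen]
      · simp [hlen]
-- ===== VERDICT (by name: the statement is the Claim_ definition above) =====
theorem is_path_match_spec : Claim_equal_is_path_match := by
  intro a s _
  unfold Spec_is_path_match
  exact main_eq a s
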